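-- pv_equiv track=rewrite | github.com/serpent1/LeetCode | ali.py | str_postion
-- ===== SOURCE A (Python) =====
-- def str_postion(str1):
--     length=len(str1)
--     dic1=dict()
--     for i in range(0,length):
--         list1=list()
--         for j in range(0,length):
--             if str1[i]==str1[j]:
--                 list1.append(j+1)
--         key=str1[i]
--         dic1[key]=list1
--     for key1,value1 in list(dic1.items()):
--         if len(value1)<=1:
--             dic1.pop(key1)
--     return dic1
-- ===== SOURCE B (Python) =====
-- def str_postion(str1):
--     pos = {}
--     for i, ch in enumerate(str1):
--         pos.setdefault(ch, []).append(i + 1)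
--     return {ch: ps for ch, ps in pos.items() if len(ps) > 1}
-- ===== Notes on version B (the rewrite author's own statement) =====
-- stated objective: faster
-- what changed: A scans the whole string again for every character (rebuilding each position list n times) and then deletes singleton entries from the dict; B makes one enumerate pass appending each 1-indexed position to its character's list and keeps only lists longer than 1 in a single comprehension.
import Mathlib
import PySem

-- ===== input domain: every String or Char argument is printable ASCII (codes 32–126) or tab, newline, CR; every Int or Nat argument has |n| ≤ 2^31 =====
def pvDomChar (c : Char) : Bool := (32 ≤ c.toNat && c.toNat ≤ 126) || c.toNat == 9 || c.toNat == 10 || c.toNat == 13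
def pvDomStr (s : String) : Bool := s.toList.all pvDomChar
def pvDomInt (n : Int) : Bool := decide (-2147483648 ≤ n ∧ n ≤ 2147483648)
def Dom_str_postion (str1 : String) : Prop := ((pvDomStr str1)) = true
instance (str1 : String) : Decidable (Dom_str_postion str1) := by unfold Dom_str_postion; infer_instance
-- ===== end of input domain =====

-- B replaces A's quadratic rescan-per-character with a single enumerate pass that appends each
-- 1-indexed position to its character's list, then keeps the lists of length > 1 (objective: faster).

-- ===== PORT A =====
-- Python's str1[i] (a 1-char string) is ported as the Char with the key materialised as String.ofList [c];
-- all indices come from range(0, len) so indexing never raises and pyGetD with an unused default is exact;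
-- dic1.pop(key1) is ported as erase: the key is always present (it came from dic1.items) and the
-- returned value is unused, so pop and erase mutate the dict identically.
def str_postion (str1 : String) : List (String × List Int) :=
  let cs := str1.toList
  let length : Int := (cs.length : Int)
  let dic1 : PySem.Dict String (List Int) := (PySem.List.pyRange 0 length).foldl (fun d i =>
      d.insert (String.ofList [PySem.List.pyGetD cs i ' '])
        ((PySem.List.pyRange 0 length).foldl (fun l j =>
          if PySem.List.pyGetD cs i ' ' == PySem.List.pyGetD cs j ' ' then l ++ [j + 1] else l) []))
    PySem.Dict.empty
  (dic1.items.foldl (fun d p => if p.2.length ≤ 1 then d.erase p.1 else d) dic1).items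

-- ===== PORT B =====
-- pos.setdefault(ch, []).append(i + 1)  ==  pos[ch] = pos.get(ch, []) + [i + 1]  ==  Dict.modify;
-- the final dict comprehension is a fold inserting the filtered items into an empty dict.
def str_postion_alt (str1 : String) : List (String × List Int) :=
  let pos : PySem.Dict String (List Int) := (PySem.List.enumerate str1.toList).foldl
      (fun d p => d.modify (String.ofList [p.2]) [] (fun l => l ++ [p.1 + 1])) PySem.Dict.empty
  (pos.items.foldl (fun d p => if 1 < p.2.length then d.insert p.1 p.2 else d) PySem.Dict.empty).items

-- ===== PRECONDITION & SPEC =====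
def Spec_str_postion (str1 : String) (out : List (String × List Int)) : Prop := out = str_postion_alt str1
instance (str1 : String) (out : List (String × List Int)) : Decidable (Spec_str_postion str1 out) := by unfold Spec_str_postion; infer_instance

-- ===== CLAIM (what is proved, stated in full; the proofs are below) =====
def Claim_equal_str_postion : Prop := ∀ (str1 : String), Dom_str_postion str1 → Spec_str_postion str1 (str_postion str1)

-- ===== LEMMAS AND PROOFS =====

/-- The 1-char String Python uses as dict key for a character. -/
def keyOf (c : Char) : String := String.ofList [c]

/-- Canonical value both dicts end up storing for character `c`: its 1-indexed positions in `cs`. -/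
def posOf (cs : List Char) (c : Char) : List Int :=
  ((PySem.List.enumerate cs).filter (fun p => p.2 == c)).map (fun p => p.1 + 1)

theorem keyOf_inj {a b : Char} : keyOf a = keyOf b ↔ a = b := by
  constructor
  · intro h; have := congrArg String.toList h; simpa [keyOf] using this
  · intro h; rw [h]

theorem getD_insert_fold_not_mem (v : Char → List Int) (t : List Char) (c : Char)
    (h : c ∉ t) : ∀ (d : PySem.Dict String (List Int)),
    (t.foldl (fun d x => d.insert (keyOf x) (v x)) d).getD (keyOf c) [] = d.getD (keyOf c) [] := by
  induction t with
  | nil => intro d; simp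
  | cons a t ih =>
    intro d
    simp only [List.foldl_cons]
    rw [ih (by simp at h; exact fun hm => h.2 hm)]
    rw [PySem.Dict.getD_insert]
    have : keyOf c ≠ keyOf a := by
      intro he; exact h (by simp [keyOf_inj.mp he])
    simp [this]

theorem getD_insert_fold_mem (v : Char → List Int) (t : List Char) (c : Char)
    (h : c ∈ t) : ∀ (d : PySem.Dict String (List Int)),
    (t.foldl (fun d x => d.insert (keyOf x) (v x)) d).getD (keyOf c) [] = v c := by
  induction t with
  | nil => exact absurd h (by simp)
  | cons a t ih =>
    intro d
    simp only [List.foldl_cons]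
    by_cases hm : c ∈ t
    · exact ih hm _
    · have hca : c = a := by
        rcases List.mem_cons.mp h with h1 | h2
        · exact h1
        · exact absurd h2 hm
      rw [getD_insert_fold_not_mem v t c hm]
      rw [hca, PySem.Dict.getD_insert]
      simp

theorem erase_keys_nodup (d : PySem.Dict String (List Int)) (k : String)
    (h : d.keys.Nodup) : (d.erase k).keys.Nodup := by
  have hs : (d.erase k).items.Sublist d.items := by
    have he : (d.erase k).items = d.items.filter (fun p => p.1 != k) := rfl
    rw [he]; exact List.filter_sublist
  have : ((d.erase k).items.map Prod.fst).Sublist (d.items.map Prod.fst) := hs.map _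
  exact List.Nodup.sublist this h

theorem erase_fold_items :
    ∀ (l : List (String × List Int)) (d : PySem.Dict String (List Int)),
    d.keys.Nodup → (l.map Prod.fst).Nodup → (∀ q ∈ l, q ∈ d.items) →
    (l.foldl (fun d p => if p.2.length ≤ 1 then d.erase p.1 else d) d).items
      = d.items.filter (fun q => !(decide (q.2.length ≤ 1) && decide (q.1 ∈ l.map Prod.fst))) := by
  intro l
  induction l with
  | nil => intro d _ _ _; simp
  | cons p l ih =>
    intro d hnd hnl hmem
    have hp : p ∈ d.items := hmem p (List.mem_cons_self)
    have hpl : p.1 ∉ l.map Prod.fst := by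
      simp only [List.map_cons, List.nodup_cons] at hnl
      exact hnl.1
    have hkeyinj : ∀ q ∈ d.items, q.1 = p.1 → q = p := by
      intro q hq hqp
      exact List.inj_on_of_nodup_map (f := Prod.fst) (l := d.items) hnd hq hp hqp
    simp only [List.foldl_cons]
    by_cases hpred : p.2.length ≤ 1
    · have he : (d.erase p.1).items = d.items.filter (fun q => q.1 != p.1) := rfl
      have hnd' : (d.erase p.1).keys.Nodup := erase_keys_nodup d p.1 hnd
      have hmem' : ∀ q ∈ l, q ∈ (d.erase p.1).items := by
        intro q hq
        rw [he, List.mem_filter]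
        refine ⟨hmem q (List.mem_cons_of_mem _ hq), ?_⟩
        have : q.1 ∈ l.map Prod.fst := List.mem_map_of_mem hq
        simp only [bne_iff_ne, ne_eq]
        intro hqe; exact hpl (hqe ▸ this)
      rw [if_pos hpred, ih (d.erase p.1) hnd' (by simp only [List.map_cons, List.nodup_cons] at hnl; exact hnl.2) hmem', he, List.filter_filter]
      apply List.filter_congr
      intro q hq
      by_cases hq1 : q.1 = p.1
      · have : q = p := hkeyinj q hq hq1
        subst this
        simp [hpred]
      · rw [List.map_cons]
        have hb : (q.1 == p.1) = false := beq_eq_false_iff_ne.mpr hq1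
        simp [List.mem_cons, hq1, hb]
    · rw [if_neg hpred, ih d hnd (by simp only [List.map_cons, List.nodup_cons] at hnl; exact hnl.2) (fun q hq => hmem q (List.mem_cons_of_mem _ hq))]
      apply List.filter_congr
      intro q hq
      by_cases hq1 : q.1 = p.1
      · have : q = p := hkeyinj q hq hq1
        subst this
        simp [hpred]
      · rw [List.map_cons]
        have hb : (q.1 == p.1) = false := beq_eq_false_iff_ne.mpr hq1
        simp [List.mem_cons, hq1, hb]

theorem enum_filter_range (t : List Char) (c : Char) : ∀ (k : Int),
    ((PySem.List.enumerate t k).filter (fun p => p.2 == c)).map (fun p => p.1 + 1)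
      = ((List.range t.length).filter (fun j => t.getD j ' ' == c)).map (fun (j : Nat) => (j : Int) + k + 1) := by
  induction t with
  | nil => intro k; simp [PySem.List.enumerate]
  | cons a t ih =>
    intro k
    have hc : PySem.List.enumerate (a :: t) k = (k, a) :: PySem.List.enumerate t (k + 1) := by
      simp [PySem.List.enumerate]
    have hr : List.range (a :: t).length = 0 :: (List.range t.length).map Nat.succ := by
      rw [List.length_cons, List.range_succ_eq_map]
    rw [hc, hr, List.filter_cons, List.filter_cons]
    have hmf : List.filter (fun j => (a :: t).getD j ' ' == c) ((List.range t.length).map Nat.succ)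
        = (List.filter (fun j => t.getD j ' ' == c) (List.range t.length)).map Nat.succ := by
      rw [List.filter_map]
      rfl
    have hface : ∀ (l : List Nat),
        (l.map Nat.succ).map (fun (j : Nat) => (j : Int) + k + 1)
          = l.map (fun (j : Nat) => (j : Int) + (k + 1) + 1) := by
      intro l
      rw [List.map_map]
      apply List.map_congr_left
      intro j _
      simp [Function.comp, Nat.succ_eq_add_one]
      ring
    simp only [List.getD_cons_zero, hmf]
    by_cases h : a == c
    · simp only [h, if_pos, List.map_cons, hface, ih (k + 1)]
      congr 1
      simp
    · simp only [h, Bool.false_eq_true, if_false, hface, ih (k + 1)]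

theorem inner_loop_eq (cs : List Char) (c : Char) :
    ((PySem.List.pyRange 0 (cs.length : Int)).filter
        (fun j => c == PySem.List.pyGetD cs j ' ')).map (fun j => j + 1) = posOf cs c := by
  have hcomm : (PySem.List.pyRange 0 (cs.length : Int)).filter (fun j => c == PySem.List.pyGetD cs j ' ')
      = (PySem.List.pyRange 0 (cs.length : Int)).filter (fun j => PySem.List.pyGetD cs j ' ' == c) := by
    apply List.filter_congr
    intro j _
    exact Bool.beq_comm
  rw [hcomm, PySem.List.pyRange_zero_natCast, List.filter_map, List.map_map]
  rw [posOf, enum_filter_range cs c 0]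
  simp only [Function.comp_def, PySem.List.pyGetD_natCast]
  apply List.map_congr_left
  intro j _
  simp

theorem map_range_getD (l : List Char) :
    (List.range l.length).map (fun i => l.getD i ' ') = l := by
  apply List.ext_getElem
  · simp
  · intro i h1 h2
    simp [List.getD_eq_getElem?_getD, List.getElem?_eq_getElem h2]

theorem foldl_range_getD (g : Char → List Int) (cs : List Char) (e : PySem.Dict String (List Int)) :
    (List.range cs.length).foldl (fun d j => d.insert (keyOf (cs.getD j ' ')) (g (cs.getD j ' '))) e
      = cs.foldl (fun d c => d.insert (keyOf c) (g c)) e := by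
  conv_rhs => rw [← map_range_getD cs]
  rw [List.foldl_map]

theorem dict_A_eq_canon (cs : List Char) :
    ((PySem.List.pyRange 0 ((cs.length : Int))).foldl (fun d i =>
        d.insert (String.ofList [PySem.List.pyGetD cs i ' '])
          ((PySem.List.pyRange 0 ((cs.length : Int))).foldl (fun l j =>
            if PySem.List.pyGetD cs i ' ' == PySem.List.pyGetD cs j ' ' then l ++ [j + 1] else l) []))
      PySem.Dict.empty : PySem.Dict String (List Int))
    = cs.foldl (fun d c => d.insert (keyOf c) (posOf cs c)) PySem.Dict.empty := by
  have hstep1 : ∀ (d : PySem.Dict String (List Int)) (i : Int), i ∈ PySem.List.pyRange 0 ((cs.length : Int)) →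
      d.insert (String.ofList [PySem.List.pyGetD cs i ' '])
        ((PySem.List.pyRange 0 ((cs.length : Int))).foldl (fun l j =>
          if PySem.List.pyGetD cs i ' ' == PySem.List.pyGetD cs j ' ' then l ++ [j + 1] else l) [])
      = d.insert (keyOf (PySem.List.pyGetD cs i ' ')) (posOf cs (PySem.List.pyGetD cs i ' ')) := by
    intro d i _
    rw [PySem.List.foldl_append_if (fun j => PySem.List.pyGetD cs i ' ' == PySem.List.pyGetD cs j ' ')
        (fun j => j + 1) _ []]
    rw [List.nil_append]
    rw [inner_loop_eq cs (PySem.List.pyGetD cs i ' ')]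
    rfl
  rw [PySem.List.foldl_congr_mem _ _ _ _ hstep1]
  rw [PySem.List.pyRange_zero_natCast, List.foldl_map]
  rw [← foldl_range_getD (posOf cs) cs PySem.Dict.empty]
  apply PySem.List.foldl_congr_mem
  intro d j _
  rw [PySem.List.pyGetD_natCast]

theorem dict_B_canon_getD (cs : List Char) (c : Char) :
    ((PySem.List.enumerate cs).foldl
        (fun d p => d.modify (String.ofList [p.2]) [] (fun l => l ++ [p.1 + 1])) PySem.Dict.empty
      : PySem.Dict String (List Int)).getD (keyOf c) [] = posOf cs c := by
  have hmap : (PySem.List.enumerate cs).foldl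
        (fun d p => d.modify (String.ofList [p.2]) [] (fun l => l ++ [p.1 + 1]))
        (PySem.Dict.empty : PySem.Dict String (List Int))
      = ((PySem.List.enumerate cs).map (fun p => (keyOf p.2, p.1 + 1))).foldl
        (fun d q => d.modify q.1 [] (fun l => l ++ [q.2])) PySem.Dict.empty := by
    rw [List.foldl_map]
    rfl
  rw [hmap, PySem.Dict.getD_foldl_modify_append]
  rw [PySem.Dict.getD_empty, List.nil_append, List.filter_map]
  rw [List.map_map, posOf]
  have : (fun (q : String × Int) => q.1 == keyOf c) ∘ (fun p : Int × Char => (keyOf p.2, p.1 + 1))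
      = fun p : Int × Char => p.2 == c := by
    funext p
    simp only [Function.comp]
    by_cases h : p.2 = c
    · simp [h]
    · have h1 : (p.2 == c) = false := beq_eq_false_iff_ne.mpr h
      have h2 : (keyOf p.2 == keyOf c) = false := beq_eq_false_iff_ne.mpr (keyOf_inj.not.mpr h)
      rw [h1, h2]
  rw [this]
  rfl

theorem canonA_keys (cs : List Char) :
    (cs.foldl (fun d c => d.insert (keyOf c) (posOf cs c)) PySem.Dict.empty
      : PySem.Dict String (List Int)).keys = PySem.Set.ofList (cs.map keyOf) := by
  rw [PySem.Dict.keys_foldl_insert_key cs keyOf (fun _ c => posOf cs c) PySem.Dict.empty]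
  rw [PySem.Dict.keys_empty, PySem.Set.update_nil_left]

theorem canonA_nodup (cs : List Char) :
    (cs.foldl (fun d c => d.insert (keyOf c) (posOf cs c)) PySem.Dict.empty
      : PySem.Dict String (List Int)).keys.Nodup :=
  PySem.Dict.nodup_keys_foldl_insert_key cs keyOf _ _ (by simp)

theorem dictB_keys (cs : List Char) :
    ((PySem.List.enumerate cs).foldl
        (fun d p => d.modify (String.ofList [p.2]) [] (fun l => l ++ [p.1 + 1])) PySem.Dict.empty
      : PySem.Dict String (List Int)).keys = PySem.Set.ofList (cs.map keyOf) := by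
  rw [PySem.Dict.keys_foldl_modify_key (PySem.List.enumerate cs) (fun p => String.ofList [p.2]) []
      (fun d x => fun l => l ++ [x.1 + 1]) PySem.Dict.empty]
  rw [PySem.Dict.keys_empty, PySem.Set.update_nil_left]
  congr 1
  rw [show (fun p : Int × Char => String.ofList [p.2]) = keyOf ∘ Prod.snd from rfl, ← List.map_map]
  rw [PySem.List.map_snd_enumerate]

theorem dictB_nodup (cs : List Char) :
    ((PySem.List.enumerate cs).foldl
        (fun d p => d.modify (String.ofList [p.2]) [] (fun l => l ++ [p.1 + 1])) PySem.Dict.empty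
      : PySem.Dict String (List Int)).keys.Nodup :=
  PySem.Dict.nodup_keys_foldl_modify_key (PySem.List.enumerate cs) (fun p => String.ofList [p.2]) []
    (fun d x => fun l => l ++ [x.1 + 1]) PySem.Dict.empty (by simp)

theorem dicts_items_eq (cs : List Char) :
    (cs.foldl (fun d c => d.insert (keyOf c) (posOf cs c)) PySem.Dict.empty
      : PySem.Dict String (List Int)).items
      = ((PySem.List.enumerate cs).foldl
          (fun d p => d.modify (String.ofList [p.2]) [] (fun l => l ++ [p.1 + 1])) PySem.Dict.empty
        : PySem.Dict String (List Int)).items := by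
  rw [PySem.Dict.items_eq_map_keys _ (canonA_nodup cs) [],
      PySem.Dict.items_eq_map_keys _ (dictB_nodup cs) []]
  rw [canonA_keys, dictB_keys]
  apply List.map_congr_left
  intro k hk
  have : k ∈ cs.map keyOf := (PySem.Set.mem_ofList _ _).mp hk
  rcases List.mem_map.mp this with ⟨c, hc, rfl⟩
  rw [getD_insert_fold_mem (posOf cs) cs c hc, dict_B_canon_getD]

-- ===== VERDICT (by name: the statement is the Claim_ definition above) =====
theorem str_postion_spec : Claim_equal_str_postion := by
  intro str1 _
  show str_postion str1 = str_postion_alt str1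
  simp only [str_postion, str_postion_alt]
  rw [dict_A_eq_canon str1.toList]
  set cs := str1.toList with hcs
  set canon : PySem.Dict String (List Int) :=
    cs.foldl (fun d c => d.insert (keyOf c) (posOf cs c)) PySem.Dict.empty with hcanon
  set posD : PySem.Dict String (List Int) :=
    (PySem.List.enumerate cs).foldl
      (fun d p => d.modify (String.ofList [p.2]) [] (fun l => l ++ [p.1 + 1])) PySem.Dict.empty with hposD
  have hndA : canon.keys.Nodup := canonA_nodup cs
  have hfstA : (canon.items.map Prod.fst).Nodup := hndA
  rw [erase_fold_items canon.items canon hndA hfstA (fun q hq => hq)]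
  -- B's comprehension: fold-with-if = fold over the filtered items
  have hbody : (fun (d : PySem.Dict String (List Int)) (p : String × List Int) =>
        if 1 < p.2.length then d.insert p.1 p.2 else d)
      = (fun d p => if (fun q : String × List Int => decide (1 < q.2.length)) p = true then d.insert p.1 p.2 else d) := by
    funext d p
    by_cases h : 1 < p.2.length <;> simp [h]
  rw [hbody, ← List.foldl_filter]
  have hndB : posD.keys.Nodup := dictB_nodup cs
  have hfstB : ((posD.items.filter (fun q : String × List Int => decide (1 < q.2.length))).map Prod.fst).Nodup := by
    have hs : ((posD.items.filter (fun q : String × List Int => decide (1 < q.2.length))).map Prod.fst).Sublist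
        (posD.items.map Prod.fst) := (List.filter_sublist).map _
    exact List.Nodup.sublist hs hndB
  rw [PySem.Dict.items_foldl_insert_fresh _ Prod.fst Prod.snd PySem.Dict.empty
      (fun a _ => by simp) hfstB]
  have hmapid : (posD.items.filter (fun q : String × List Int => decide (1 < q.2.length))).map
      (fun a => (Prod.fst a, Prod.snd a)) = posD.items.filter (fun q : String × List Int => decide (1 < q.2.length)) := by
    simp
  rw [hmapid]
  have hitems : canon.items = posD.items := dicts_items_eq cs
  rw [← hitems]
  rw [show (PySem.Dict.empty : PySem.Dict String (List Int)).items = [] from rfl, List.nil_append]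
  apply List.filter_congr
  intro q hq
  have hq1 : q.1 ∈ canon.items.map Prod.fst := List.mem_map_of_mem hq
  simp only [hq1, decide_true, Bool.and_true]
  by_cases h : q.2.length ≤ 1
  · simp [h, Nat.not_lt.mpr h]
  · simp [h, Nat.lt_of_not_le h]
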